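-- pv_equiv track=rewrite | github.com/Autocrit/simple_stepper_motor_analyzer | tools/mk2_lookup_tables_generator.py | uint16_value_to_gpio_masks
-- ===== SOURCE A (Python) =====
-- WR_PIN = 1
--
-- DATA_PINS = [
--     28, 3, 6, 7,  # D0 - D3
--     8, 9, 22, 10,  # D4 - D7
--     11, 21, 12, 20,  # D8 - D11
--     13, 19, 14, 18  # D12 - D15
-- ]
--
-- def uint16_value_to_gpio_masks(uint16_value):
--     assert uint16_value >= 0
--     assert uint16_value < 1 << 16
--     assert type(uint16_value) is int
--
--     # We always clear the WR pin, to generate the WR pulse.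
--     #
--     # NOTE: also setting the WR pin using the set table doesn't
--     # work because it doesn't provide sufficient hold time for
--     # the data before the WR low-to-high transition.
--     #
--     gpio_set_mask = 0
--     gpio_clr_mask = (1 << WR_PIN)
--     for bit in range(0, 16):
--         pin_index = DATA_PINS[bit]
--         pin_mask = (1 << pin_index)
--         if ((uint16_value & (1 << bit)) != 0):
--             gpio_set_mask |= pin_mask
--         else:
--             gpio_clr_mask |= pin_mask
--     return [gpio_set_mask, gpio_clr_mask]
-- ===== SOURCE B (Python) =====
-- WR_PIN = 1
--
-- DATA_PINS = [
--     28, 3, 6, 7,  # D0 - D3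
--     8, 9, 22, 10,  # D4 - D7
--     11, 21, 12, 20,  # D8 - D11
--     13, 19, 14, 18  # D12 - D15
-- ]
--
--
-- def _nibble_set_table(nibble_index):
--     # Set mask contributed by the 4 data pins of this nibble, for each
--     # of the 16 possible nibble values.
--     table = []
--     for nib in range(16):
--         mask = 0
--         for k in range(4):
--             if nib & (1 << k) != 0:
--                 mask |= 1 << DATA_PINS[4 * nibble_index + k]
--         table.append(mask)
--     return table
--
--
-- _SET_TABLES = [_nibble_set_table(i) for i in range(4)]
--
-- _ALL_DATA_MASK = 0
-- for _p in DATA_PINS: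
--     _ALL_DATA_MASK |= 1 << _p
--
--
-- def uint16_value_to_gpio_masks(uint16_value):
--     assert uint16_value >= 0
--     assert uint16_value < 1 << 16
--     assert type(uint16_value) is int
--
--     # Four precomputed-table lookups, one per nibble; no per-call bit loop.
--     gpio_set_mask = (_SET_TABLES[0][uint16_value & 15]
--                      | _SET_TABLES[1][(uint16_value >> 4) & 15]
--                      | _SET_TABLES[2][(uint16_value >> 8) & 15]
--                      | _SET_TABLES[3][(uint16_value >> 12) & 15])
--     # Clear mask: the WR pin plus every data pin not in the set mask.
--     gpio_clr_mask = (1 << WR_PIN) | (_ALL_DATA_MASK ^ gpio_set_mask)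
--     return [gpio_set_mask, gpio_clr_mask]
-- ===== Notes on version B (the rewrite author's own statement) =====
-- stated objective: alternative
-- what changed: B replaces A's 16-iteration per-call if/else loop over the bits by four precomputed per-nibble lookup tables (built once at module load): the set mask is the OR of four table entries indexed by the value's nibbles, and the clear mask is derived as the WR pin ORed with ALL_DATA_MASK XOR the set mask.
import Mathlib
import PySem

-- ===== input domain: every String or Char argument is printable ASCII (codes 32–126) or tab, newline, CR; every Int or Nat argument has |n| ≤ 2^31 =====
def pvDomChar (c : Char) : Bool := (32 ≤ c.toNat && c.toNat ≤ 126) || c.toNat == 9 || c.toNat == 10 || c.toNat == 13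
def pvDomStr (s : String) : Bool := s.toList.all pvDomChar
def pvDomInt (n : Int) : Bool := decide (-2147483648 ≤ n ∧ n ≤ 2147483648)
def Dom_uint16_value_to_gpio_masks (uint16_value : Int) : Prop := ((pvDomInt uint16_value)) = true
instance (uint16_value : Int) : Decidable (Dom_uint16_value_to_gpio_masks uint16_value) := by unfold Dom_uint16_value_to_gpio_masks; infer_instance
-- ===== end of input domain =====

-- B replaces A's 16-iteration if/else loop by four precomputed per-nibble lookup
-- tables (set mask = OR of four table entries, clear mask derived from the
-- all-data-pins mask); objective: alternative algorithm (table lookup).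

-- ===== PORT A =====
def pvWRPin : Int := 1
def pvDataPins : List Int := [28, 3, 6, 7, 8, 9, 22, 10, 11, 21, 12, 20, 13, 19, 14, 18]

-- Shift amounts use .toNat: every shift amount in the source (WR_PIN, the pins, bit 0..15)
-- is a nonnegative literal-derived value, where .toNat is exact.
def uint16_value_to_gpio_masks (uint16_value : Int) : List Int :=
  let st := (PySem.List.pyRange 0 16 1).foldl
    (fun (st : Int × Int) (bit : Int) =>
      let pin_index := PySem.List.pyGetD pvDataPins bit 0
      let pin_mask := (1 : Int) <<< pin_index.toNat
      if PySem.Int.band uint16_value ((1 : Int) <<< bit.toNat) ≠ 0 then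
        (PySem.Int.bor st.1 pin_mask, st.2)
      else
        (st.1, PySem.Int.bor st.2 pin_mask))
    (0, (1 : Int) <<< pvWRPin.toNat)
  [st.1, st.2]

-- ===== PORT B =====
-- module-level helper _nibble_set_table: builds the 16-entry set-mask table for one nibble
def pvNibbleSetTable (nibble_index : Int) : List Int :=
  (PySem.List.pyRange 0 16 1).foldl
    (fun (table : List Int) (nib : Int) =>
      table ++ [ (PySem.List.pyRange 0 4 1).foldl
        (fun (mask : Int) (k : Int) =>
          if PySem.Int.band nib ((1 : Int) <<< k.toNat) ≠ 0 then
            PySem.Int.bor mask ((1 : Int) <<< (PySem.List.pyGetD pvDataPins (4 * nibble_index + k) 0).toNat)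
          else mask) 0 ])
    []

def pvSetTables : List (List Int) :=
  (PySem.List.pyRange 0 4 1).map (fun i => pvNibbleSetTable i)

def pvAllDataMask : Int := pvDataPins.foldl (fun m p => PySem.Int.bor m ((1 : Int) <<< p.toNat)) 0

def uint16_value_to_gpio_masks_alt (uint16_value : Int) : List Int :=
  let s := PySem.Int.bor (PySem.Int.bor (PySem.Int.bor
      (PySem.List.pyGetD (PySem.List.pyGetD pvSetTables 0 []) (PySem.Int.band uint16_value 15) 0)
      (PySem.List.pyGetD (PySem.List.pyGetD pvSetTables 1 []) (PySem.Int.band (uint16_value >>> (4:Nat)) 15) 0))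
      (PySem.List.pyGetD (PySem.List.pyGetD pvSetTables 2 []) (PySem.Int.band (uint16_value >>> (8:Nat)) 15) 0))
      (PySem.List.pyGetD (PySem.List.pyGetD pvSetTables 3 []) (PySem.Int.band (uint16_value >>> (12:Nat)) 15) 0)
  let c := PySem.Int.bor ((1 : Int) <<< pvWRPin.toNat) (PySem.Int.bxor pvAllDataMask s)
  [s, c]

-- ===== PRECONDITION & SPEC =====
-- Pre_ excludes exactly the inputs on which A's asserts raise AssertionError (v < 0 or v ≥ 2^16).
def Pre_uint16_value_to_gpio_masks (uint16_value : Int) : Prop :=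
  0 ≤ uint16_value ∧ uint16_value < 65536
instance (uint16_value : Int) : Decidable (Pre_uint16_value_to_gpio_masks uint16_value) := by unfold Pre_uint16_value_to_gpio_masks; infer_instance
def pvWitness_uint16_value_to_gpio_masks : Int := 41703

def Spec_uint16_value_to_gpio_masks (uint16_value : Int) (out : List Int) : Prop := out = uint16_value_to_gpio_masks_alt uint16_value
instance (uint16_value : Int) (out : List Int) : Decidable (Spec_uint16_value_to_gpio_masks uint16_value out) := by unfold Spec_uint16_value_to_gpio_masks; infer_instance

-- ===== CLAIM (what is proved, stated in full; the proofs are below) =====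
def Claim_equal_uint16_value_to_gpio_masks : Prop := ∀ (uint16_value : Int), Dom_uint16_value_to_gpio_masks uint16_value → Pre_uint16_value_to_gpio_masks uint16_value → Spec_uint16_value_to_gpio_masks uint16_value (uint16_value_to_gpio_masks uint16_value)

-- ===== LEMMAS AND PROOFS =====

-- Nat-level reference: the 16 (bit, pin) pairs, as Nats.
def pvPairs : List (Nat × Nat) :=
  [(0,28),(1,3),(2,6),(3,7),(4,8),(5,9),(6,22),(7,10),(8,11),(9,21),(10,12),(11,20),(12,13),(13,19),(14,14),(15,18)]

def pvFS (n : Nat) (ps : List (Nat × Nat)) (s : Nat) : Nat :=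
  ps.foldl (fun s jq => if n.testBit jq.1 then s ||| 2 ^ jq.2 else s) s

def pvFC (n : Nat) (ps : List (Nat × Nat)) (c : Nat) : Nat :=
  ps.foldl (fun c jq => if n.testBit jq.1 then c else c ||| 2 ^ jq.2) c

def pvMOf : List (Nat × Nat) → Nat
  | [] => 0
  | jq :: tl => 2 ^ jq.2 ||| pvMOf tl

-- the four global chunks and their local (nibble-relative) versions
def pvG0 : List (Nat × Nat) := [(0,28),(1,3),(2,6),(3,7)]
def pvG1 : List (Nat × Nat) := [(4,8),(5,9),(6,22),(7,10)]
def pvG2 : List (Nat × Nat) := [(8,11),(9,21),(10,12),(11,20)]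
def pvG3 : List (Nat × Nat) := [(12,13),(13,19),(14,14),(15,18)]
def pvL0 : List (Nat × Nat) := [(0,28),(1,3),(2,6),(3,7)]
def pvL1 : List (Nat × Nat) := [(0,8),(1,9),(2,22),(3,10)]
def pvL2 : List (Nat × Nat) := [(0,11),(1,21),(2,12),(3,20)]
def pvL3 : List (Nat × Nat) := [(0,13),(1,19),(2,14),(3,18)]

theorem pv_tb_fS (n : Nat) (ps : List (Nat × Nat)) (s k : Nat) :
    (pvFS n ps s).testBit k = (s.testBit k || ps.any (fun jq => decide (jq.2 = k) && n.testBit jq.1)) := by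
  induction ps generalizing s with
  | nil => simp [pvFS]
  | cons jq tl ih =>
    simp only [pvFS, List.foldl_cons, List.any_cons]
    by_cases h : n.testBit jq.1
    · rw [show (List.foldl _ _ tl) = pvFS n tl (if n.testBit jq.1 then s ||| 2 ^ jq.2 else s) from rfl,
        ih]
      simp [h, Nat.testBit_two_pow]
      cases hd : decide (jq.2 = k) <;> simp_all [Bool.or_comm]
    · rw [show (List.foldl _ _ tl) = pvFS n tl (if n.testBit jq.1 then s ||| 2 ^ jq.2 else s) from rfl,
        ih]
      simp [h]

theorem pv_tb_fC (n : Nat) (ps : List (Nat × Nat)) (c k : Nat) :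
    (pvFC n ps c).testBit k = (c.testBit k || ps.any (fun jq => decide (jq.2 = k) && !n.testBit jq.1)) := by
  induction ps generalizing c with
  | nil => simp [pvFC]
  | cons jq tl ih =>
    simp only [pvFC, List.foldl_cons, List.any_cons]
    by_cases h : n.testBit jq.1
    · rw [show (List.foldl _ _ tl) = pvFC n tl (if n.testBit jq.1 then c else c ||| 2 ^ jq.2) from rfl,
        ih]
      simp [h]
    · rw [show (List.foldl _ _ tl) = pvFC n tl (if n.testBit jq.1 then c else c ||| 2 ^ jq.2) from rfl,
        ih]
      simp [h, Nat.testBit_two_pow]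
      cases hd : decide (jq.2 = k) <;> simp_all [Bool.or_comm]

theorem pv_tb_mOf (ps : List (Nat × Nat)) (k : Nat) :
    (pvMOf ps).testBit k = ps.any (fun jq => decide (jq.2 = k)) := by
  induction ps with
  | nil => simp [pvMOf]
  | cons jq tl ih => simp [pvMOf, Nat.testBit_two_pow, ih]

theorem pv_any_false {ps : List (Nat × Nat)} {k : Nat} (h : k ∉ ps.map Prod.snd)
    (f : Nat × Nat → Bool) : ps.any (fun jq => decide (jq.2 = k) && f jq) = false := by
  simp only [List.any_eq_false]
  intro jq hjq
  have : jq.2 ≠ k := fun he => h (he ▸ List.mem_map_of_mem hjq)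
  simp [this]

theorem pv_G (n : Nat) (ps : List (Nat × Nat)) (h : (ps.map Prod.snd).Nodup) (k : Nat) :
    ps.any (fun jq => decide (jq.2 = k) && !n.testBit jq.1)
      = ((ps.any fun jq => decide (jq.2 = k)) ^^ (ps.any fun jq => decide (jq.2 = k) && n.testBit jq.1)) := by
  induction ps with
  | nil => simp
  | cons jq tl ih =>
    simp only [List.map_cons, List.nodup_cons] at h
    by_cases hk : jq.2 = k
    · have hnm : k ∉ tl.map Prod.snd := hk ▸ h.1
      simp only [List.any_cons, hk, decide_true, Bool.true_and,
        pv_any_false hnm (fun jq => !n.testBit jq.1), pv_any_false hnm (fun jq => n.testBit jq.1)]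
      have : tl.any (fun jq => decide (jq.2 = k)) = false := by
        have := pv_any_false hnm (fun _ => true)
        simpa using this
      simp [this]
    · simp [List.any_cons, hk, ih h.2]

theorem pv_main (n : Nat) : pvFC n pvPairs 2 = 2 ||| (pvMOf pvPairs ^^^ pvFS n pvPairs 0) := by
  apply Nat.eq_of_testBit_eq
  intro k
  rw [pv_tb_fC, Nat.testBit_lor, Nat.testBit_xor, pv_tb_mOf, pv_tb_fS,
    pv_G n pvPairs (by decide) k]
  simp

-- ---- bridging the Int port of A to the Nat reference ----

theorem pv_pinmap : (List.range 16).map (fun k => (k, (pvDataPins.getD k 0).toNat)) = pvPairs := by decide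

theorem pv_stepS (n x k : Nat) :
    (if PySem.Int.band (↑n) ((1 : Int) <<< k) ≠ 0
      then PySem.Int.bor (↑x) ((1 : Int) <<< ((pvDataPins.getD k 0).toNat))
      else (↑x : Int))
    = ↑(if n.testBit k then x ||| 2 ^ (pvDataPins.getD k 0).toNat else x) := by
  have hc : ((1 : Int) <<< k) = ((2 ^ k : Nat) : Int) := by
    rw [show ((1 : Int)) = ((1 : Nat) : Int) from rfl, ← Int.natCast_shiftLeft, Nat.one_shiftLeft]
  have hp : ((1 : Int) <<< ((pvDataPins.getD k 0).toNat)) = ((2 ^ (pvDataPins.getD k 0).toNat : Nat) : Int) := by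
    rw [show ((1 : Int)) = ((1 : Nat) : Int) from rfl, ← Int.natCast_shiftLeft, Nat.one_shiftLeft]
  rw [hc, hp, PySem.Int.band_natCast, Nat.and_two_pow]
  cases h : n.testBit k
  · simp only [Bool.toNat_false, Nat.zero_mul]
    rw [if_neg (by simp), if_neg (by simp)]
  · simp only [Bool.toNat_true, Nat.one_mul]
    rw [if_pos (by simp), if_pos trivial]
    exact PySem.Int.bor_natCast _ _

theorem pv_stepC (n x k : Nat) :
    (if PySem.Int.band (↑n) ((1 : Int) <<< k) ≠ 0
      then (↑x : Int)
      else PySem.Int.bor (↑x) ((1 : Int) <<< ((pvDataPins.getD k 0).toNat)))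
    = ↑(if n.testBit k then x else x ||| 2 ^ (pvDataPins.getD k 0).toNat) := by
  have hc : ((1 : Int) <<< k) = ((2 ^ k : Nat) : Int) := by
    rw [show ((1 : Int)) = ((1 : Nat) : Int) from rfl, ← Int.natCast_shiftLeft, Nat.one_shiftLeft]
  have hp : ((1 : Int) <<< ((pvDataPins.getD k 0).toNat)) = ((2 ^ (pvDataPins.getD k 0).toNat : Nat) : Int) := by
    rw [show ((1 : Int)) = ((1 : Nat) : Int) from rfl, ← Int.natCast_shiftLeft, Nat.one_shiftLeft]
  rw [hc, hp, PySem.Int.band_natCast, Nat.and_two_pow]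
  cases h : n.testBit k
  · simp only [Bool.toNat_false, Nat.zero_mul]
    rw [if_neg (by simp), if_neg (by simp)]
    exact PySem.Int.bor_natCast _ _
  · simp only [Bool.toNat_true, Nat.one_mul]
    rw [if_pos (by simp), if_pos trivial]

theorem pv_bridgeA (n : Nat) :
    uint16_value_to_gpio_masks (↑n) = [↑(pvFS n pvPairs 0), ↑(pvFC n pvPairs 2)] := by
  have hshow : uint16_value_to_gpio_masks (↑n)
      = [(List.foldl
            (fun (st : Int × Int) (k : Nat) =>
              if PySem.Int.band (↑n) ((1 : Int) <<< ((k : Int)).toNat) ≠ 0 then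
                (PySem.Int.bor st.1 ((1 : Int) <<< ((PySem.List.pyGetD pvDataPins (↑k) 0)).toNat), st.2)
              else
                (st.1, PySem.Int.bor st.2 ((1 : Int) <<< ((PySem.List.pyGetD pvDataPins (↑k) 0)).toNat)))
            ((0 : Int), (1 : Int) <<< pvWRPin.toNat) (List.range 16)).1,
         (List.foldl
            (fun (st : Int × Int) (k : Nat) =>
              if PySem.Int.band (↑n) ((1 : Int) <<< ((k : Int)).toNat) ≠ 0 then
                (PySem.Int.bor st.1 ((1 : Int) <<< ((PySem.List.pyGetD pvDataPins (↑k) 0)).toNat), st.2)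
              else
                (st.1, PySem.Int.bor st.2 ((1 : Int) <<< ((PySem.List.pyGetD pvDataPins (↑k) 0)).toNat)))
            ((0 : Int), (1 : Int) <<< pvWRPin.toNat) (List.range 16)).2] := by
    unfold uint16_value_to_gpio_masks
    rw [show ((16 : Int)) = ((16 : Nat) : Int) from rfl, PySem.List.pyRange_zero_natCast,
      List.foldl_map]
  rw [hshow]
  rw [PySem.List.foldl_congr_mem (List.range 16)
    (fun (st : Int × Int) (k : Nat) =>
      if PySem.Int.band (↑n) ((1 : Int) <<< ((k : Int)).toNat) ≠ 0 then
        (PySem.Int.bor st.1 ((1 : Int) <<< ((PySem.List.pyGetD pvDataPins (↑k) 0)).toNat), st.2)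
      else
        (st.1, PySem.Int.bor st.2 ((1 : Int) <<< ((PySem.List.pyGetD pvDataPins (↑k) 0)).toNat)))
    (fun (st : Int × Int) (k : Nat) =>
      ((if PySem.Int.band (↑n) ((1 : Int) <<< k) ≠ 0
          then PySem.Int.bor st.1 ((1 : Int) <<< ((pvDataPins.getD k 0).toNat))
          else st.1),
       (if PySem.Int.band (↑n) ((1 : Int) <<< k) ≠ 0
          then st.2
          else PySem.Int.bor st.2 ((1 : Int) <<< ((pvDataPins.getD k 0).toNat)))))
    _ (by
      intro acc x hx
      simp only [PySem.List.pyGetD_natCast, Int.toNat_natCast]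
      by_cases h : PySem.Int.band (↑n) ((1 : Int) <<< x) ≠ 0 <;> simp [h])]
  rw [PySem.List.foldl_prod_mk
    (fun (a : Int) (k : Nat) =>
      if PySem.Int.band (↑n) ((1 : Int) <<< k) ≠ 0
        then PySem.Int.bor a ((1 : Int) <<< ((pvDataPins.getD k 0).toNat)) else a)
    (fun (b : Int) (k : Nat) =>
      if PySem.Int.band (↑n) ((1 : Int) <<< k) ≠ 0
        then b else PySem.Int.bor b ((1 : Int) <<< ((pvDataPins.getD k 0).toNat)))
    (List.range 16) (0 : Int) ((1 : Int) <<< pvWRPin.toNat)]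
  have hS : List.foldl (fun (s : Int) (k : Nat) =>
      if PySem.Int.band (↑n) ((1 : Int) <<< k) ≠ 0
        then PySem.Int.bor s ((1 : Int) <<< ((pvDataPins.getD k 0).toNat)) else s)
      ((0 : Int)) (List.range 16) = ↑(pvFS n pvPairs 0) := by
    rw [show ((0 : Int)) = ((0 : Nat) : Int) from rfl,
      List.foldl_hom (Nat.cast : Nat → Int)
        (g₁ := fun (x : Nat) (k : Nat) => if n.testBit k then x ||| 2 ^ (pvDataPins.getD k 0).toNat else x)
        (fun x k => pv_stepS n x k)]
    have : pvFS n pvPairs 0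
        = List.foldl (fun (x : Nat) (k : Nat) => if n.testBit k then x ||| 2 ^ (pvDataPins.getD k 0).toNat else x) 0 (List.range 16) := by
      unfold pvFS
      rw [← pv_pinmap, List.foldl_map]
    rw [this]
  have hC : List.foldl (fun (c : Int) (k : Nat) =>
      if PySem.Int.band (↑n) ((1 : Int) <<< k) ≠ 0
        then c else PySem.Int.bor c ((1 : Int) <<< ((pvDataPins.getD k 0).toNat)))
      ((1 : Int) <<< pvWRPin.toNat) (List.range 16) = ↑(pvFC n pvPairs 2) := by
    rw [show ((1 : Int) <<< pvWRPin.toNat) = ((2 : Nat) : Int) from rfl,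
      List.foldl_hom (Nat.cast : Nat → Int)
        (g₁ := fun (x : Nat) (k : Nat) => if n.testBit k then x else x ||| 2 ^ (pvDataPins.getD k 0).toNat)
        (fun x k => pv_stepC n x k)]
    have : pvFC n pvPairs 2
        = List.foldl (fun (x : Nat) (k : Nat) => if n.testBit k then x else x ||| 2 ^ (pvDataPins.getD k 0).toNat) 2 (List.range 16) := by
      unfold pvFC
      rw [← pv_pinmap, List.foldl_map]
    rw [this]
  rw [hS, hC]

-- ---- bridging the Int port of B to the Nat reference ----

theorem pvFS_shift (n : Nat) (l : List (Nat × Nat)) (s : Nat) :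
    pvFS n l s = s ||| pvFS n l 0 := by
  apply Nat.eq_of_testBit_eq
  intro k
  simp [pv_tb_fS]

theorem pvFS_append (n : Nat) (l1 l2 : List (Nat × Nat)) (s : Nat) :
    pvFS n (l1 ++ l2) s = pvFS n l2 (pvFS n l1 s) := by
  simp [pvFS, List.foldl_append]

theorem pv_split (n : Nat) :
    pvFS n pvPairs 0
      = ((pvFS n pvG0 0 ||| pvFS n pvG1 0) ||| pvFS n pvG2 0) ||| pvFS n pvG3 0 := by
  have h : pvPairs = ((pvG0 ++ pvG1) ++ pvG2) ++ pvG3 := by decide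
  rw [h, pvFS_append, pvFS_append, pvFS_append,
    pvFS_shift n pvG3, pvFS_shift n pvG2, pvFS_shift n pvG1, pvFS_shift n pvG0]

theorem pv_tb16 (x j : Nat) : (x % 16).testBit j = (decide (j < 4) && x.testBit j) := by
  have := Nat.testBit_mod_two_pow x 4 j
  simpa using this

theorem pv_chunk0 (n : Nat) : pvFS n pvG0 0 = pvFS ((n >>> 0) % 16) pvL0 0 := by
  simp [pvFS, pvG0, pvL0, pv_tb16]

theorem pv_chunk1 (n : Nat) : pvFS n pvG1 0 = pvFS ((n >>> 4) % 16) pvL1 0 := by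
  simp [pvFS, pvG1, pvL1, pv_tb16, Nat.testBit_shiftRight]

theorem pv_chunk2 (n : Nat) : pvFS n pvG2 0 = pvFS ((n >>> 8) % 16) pvL2 0 := by
  simp [pvFS, pvG2, pvL2, pv_tb16, Nat.testBit_shiftRight]

theorem pv_chunk3 (n : Nat) : pvFS n pvG3 0 = pvFS ((n >>> 12) % 16) pvL3 0 := by
  simp [pvFS, pvG3, pvL3, pv_tb16, Nat.testBit_shiftRight]

-- the generated tables agree with the Nat reference on every index < 16
theorem pv_tbl0 : ∀ m : Nat, m < 16 →
    PySem.List.pyGetD (PySem.List.pyGetD pvSetTables 0 []) (↑m) 0 = ↑(pvFS m pvL0 0) := by decide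
theorem pv_tbl1 : ∀ m : Nat, m < 16 →
    PySem.List.pyGetD (PySem.List.pyGetD pvSetTables 1 []) (↑m) 0 = ↑(pvFS m pvL1 0) := by decide
theorem pv_tbl2 : ∀ m : Nat, m < 16 →
    PySem.List.pyGetD (PySem.List.pyGetD pvSetTables 2 []) (↑m) 0 = ↑(pvFS m pvL2 0) := by decide
theorem pv_tbl3 : ∀ m : Nat, m < 16 →
    PySem.List.pyGetD (PySem.List.pyGetD pvSetTables 3 []) (↑m) 0 = ↑(pvFS m pvL3 0) := by decide

theorem pv_idx (n : Nat) (s : Nat) :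
    PySem.Int.band ((↑n : Int) >>> s) 15 = ↑((n >>> s) % 16) := by
  rw [← Int.natCast_shiftRight, show ((15 : Int)) = ((15 : Nat) : Int) from rfl,
    PySem.Int.band_natCast]
  congr 1
  have := Nat.and_two_pow_sub_one_eq_mod (n >>> s) 4
  simpa using this

theorem pv_allmask : pvAllDataMask = ↑(pvMOf pvPairs) := by decide

theorem pv_bridgeB (n : Nat) :
    uint16_value_to_gpio_masks_alt (↑n)
      = [↑(pvFS n pvPairs 0), ↑(2 ||| (pvMOf pvPairs ^^^ pvFS n pvPairs 0))] := by
  have h0 : PySem.Int.band ((↑n : Int)) 15 = ↑((n >>> 0) % 16) := by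
    rw [show ((15 : Int)) = ((15 : Nat) : Int) from rfl, PySem.Int.band_natCast]
    congr 1
    have := Nat.and_two_pow_sub_one_eq_mod n 4
    simpa using this
  have hs : PySem.Int.bor (PySem.Int.bor (PySem.Int.bor
      (PySem.List.pyGetD (PySem.List.pyGetD pvSetTables 0 []) (PySem.Int.band (↑n) 15) 0)
      (PySem.List.pyGetD (PySem.List.pyGetD pvSetTables 1 []) (PySem.Int.band ((↑n : Int) >>> (4:Nat)) 15) 0))
      (PySem.List.pyGetD (PySem.List.pyGetD pvSetTables 2 []) (PySem.Int.band ((↑n : Int) >>> (8:Nat)) 15) 0))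
      (PySem.List.pyGetD (PySem.List.pyGetD pvSetTables 3 []) (PySem.Int.band ((↑n : Int) >>> (12:Nat)) 15) 0)
      = ↑(pvFS n pvPairs 0) := by
    rw [h0, pv_idx n 4, pv_idx n 8, pv_idx n 12,
      pv_tbl0 _ (Nat.mod_lt _ (by norm_num)), pv_tbl1 _ (Nat.mod_lt _ (by norm_num)),
      pv_tbl2 _ (Nat.mod_lt _ (by norm_num)), pv_tbl3 _ (Nat.mod_lt _ (by norm_num)),
      PySem.Int.bor_natCast, PySem.Int.bor_natCast, PySem.Int.bor_natCast,
      ← pv_chunk0, ← pv_chunk1, ← pv_chunk2, ← pv_chunk3, ← pv_split]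
  unfold uint16_value_to_gpio_masks_alt
  rw [hs, pv_allmask]
  show [(↑(pvFS n pvPairs 0) : Int),
      PySem.Int.bor ((1 : Int) <<< pvWRPin.toNat)
        (PySem.Int.bxor (↑(pvMOf pvPairs)) (↑(pvFS n pvPairs 0)))] = _
  rw [PySem.Int.bxor_natCast,
    show ((1 : Int) <<< pvWRPin.toNat) = ((2 : Nat) : Int) from rfl, PySem.Int.bor_natCast]

-- ===== VERDICT (by name: the statement is the Claim_ definition above) =====
theorem uint16_value_to_gpio_masks_spec : Claim_equal_uint16_value_to_gpio_masks := by
  intro v _ hpre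
  obtain ⟨n, rfl⟩ : ∃ n : Nat, v = ↑n := ⟨v.toNat, (Int.toNat_of_nonneg hpre.1).symm⟩
  unfold Spec_uint16_value_to_gpio_masks
  rw [pv_bridgeA, pv_bridgeB, pv_main]
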